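-- pv_equiv track=rewrite | github.com/SOPHEA36/Chat-04-Feb-2 | scripts 2/rag_engine.py | extract_evidence_lines
-- ===== SOURCE A (Python) =====
-- from typing import Dict, Any, List, Optional, Tuple
--
-- def extract_evidence_lines(docs: List[str], keywords: List[str], max_lines: int = 6) -> List[str]:
--     def is_noise(line: str) -> bool:
--         low = line.strip().lower()
--         if not low:
--             return True
--         if low.startswith("source:"):
--             return True
--         if low.startswith("http://") or low.startswith("https://"):
--             return True
--         return False
--
--     keys = [k.strip().lower() for k in (keywords or []) if k and k.strip()]
--     if not keys:
--         return []
--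
--     scored: Dict[str, int] = {}
--
--     for d in docs:
--         for line in d.splitlines():
--             clean = line.strip()
--             if is_noise(clean):
--                 continue
--             low = clean.lower()
--
--             hit = 0
--             for k in keys:
--                 if k in low:
--                     hit += 1
--
--             if hit > 0:
--                 if clean not in scored or hit > scored[clean]:
--                     scored[clean] = hit
--
--     ranked = sorted(scored.items(), key=lambda x: (-x[1], len(x[0])))
--     return [x[0] for x in ranked[:max_lines]]
-- ===== SOURCE B (Python) =====
-- def extract_evidence_lines(docs, keywords, max_lines=6):
--     keys = [k.strip().lower() for k in (keywords or []) if k and k.strip()]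
--     if not keys:
--         return []
--     seen = set()
--     ranked = []  # (hit, clean) pairs, kept ordered by (-hit, len(clean)); stable online insertion
--     for d in docs:
--         for line in d.splitlines():
--             clean = line.strip()
--             if not clean or clean in seen:
--                 continue
--             seen.add(clean)
--             low = clean.lower()
--             if low.startswith("source:") or low.startswith("http://") or low.startswith("https://"):
--                 continue
--             hit = sum(1 for k in keys if k in low)
--             if hit == 0:
--                 continue
--             pos = len(ranked)
--             for i, (h, c) in enumerate(ranked):
--                 if (-hit, len(clean)) < (-h, len(c)):
--                     pos = i
--                     break
--             ranked.insert(pos, (hit, clean))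
--     return [c for _, c in ranked[:max_lines]]
-- ===== Notes on version B (the rewrite author's own statement) =====
-- stated objective: alternative
-- what changed: B replaces A's dict-of-max-scores plus a final batch sort with a single streaming pass that dedups via a seen-set and maintains the ranking online, inserting each new qualifying line into a list kept ordered by (-hit, len) (stable incremental insertion, no dict and no sort call).
import Mathlib
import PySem

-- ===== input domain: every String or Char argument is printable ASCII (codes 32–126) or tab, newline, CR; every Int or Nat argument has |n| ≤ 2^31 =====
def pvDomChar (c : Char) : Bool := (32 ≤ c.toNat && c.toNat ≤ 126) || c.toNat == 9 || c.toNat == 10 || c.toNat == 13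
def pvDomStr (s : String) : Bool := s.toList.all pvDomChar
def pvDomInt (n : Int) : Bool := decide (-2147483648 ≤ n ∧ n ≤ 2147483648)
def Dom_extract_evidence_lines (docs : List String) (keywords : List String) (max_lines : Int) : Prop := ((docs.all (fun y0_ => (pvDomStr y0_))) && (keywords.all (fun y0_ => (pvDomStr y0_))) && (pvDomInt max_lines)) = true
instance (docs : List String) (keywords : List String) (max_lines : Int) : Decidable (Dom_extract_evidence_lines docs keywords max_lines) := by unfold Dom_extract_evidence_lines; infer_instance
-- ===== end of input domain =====

-- B drops A's dict-of-max-scores and final batch sort: one streaming pass with a seen-set that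
-- keeps the ranking ordered online by stable insertion into a list sorted by (-hit, len).

-- ===== PORT A =====
-- A's nested helper is_noise(line): strips, lowers, checks emptiness and the noise prefixes.
def pyIsNoise (line : String) : Bool :=
  let low := PySem.Str.lower (PySem.Str.strip line)
  if low == "" then true
  else if PySem.Str.startswith low "source:" then true
  else if PySem.Str.startswith low "http://" || PySem.Str.startswith low "https://" then true
  else false

def extract_evidence_lines (docs : List String) (keywords : List String) (max_lines : Int) : List String :=
  let keys := (keywords.filter (fun k => !(k == "") && !(PySem.Str.strip k == ""))).map
    (fun k => PySem.Str.lower (PySem.Str.strip k))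
  if keys.isEmpty then []
  else
    let scored : PySem.Dict String Int :=
      docs.foldl (fun scored d =>
        (PySem.Str.splitlines d).foldl (fun scored line =>
          let clean := PySem.Str.strip line
          if pyIsNoise clean then scored
          else
            let low := PySem.Str.lower clean
            let hit : Int := keys.foldl (fun h k => if PySem.Str.isIn k low then h + 1 else h) 0
            if 0 < hit then
              if !(scored.contains clean) || decide (scored.getD clean 0 < hit) then
                scored.insert clean hit
              else scored
            else scored) scored) PySem.Dict.empty
    let ranked := PySem.List.sorted2 scored.items (fun x => -x.2) (fun x => (PySem.Str.len x.1 : Int))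
    (PySem.List.slice ranked none (some max_lines)).map (fun x => x.1)

-- ===== PORT B =====
-- B's inner insertion scan: find the first entry whose (-hit, len) key is strictly greater
-- (Python tuple '<' written out componentwise) and insert before it.
def bInsert (x : Int × String) : List (Int × String) → List (Int × String)
  | [] => [x]
  | y :: ys =>
    if decide (-x.1 < -y.1) || ((-x.1 == -y.1) && decide ((PySem.Str.len x.2 : Int) < (PySem.Str.len y.2 : Int)))
    then x :: y :: ys
    else y :: bInsert x ys

-- B's per-line loop body (state = (seen, ranked)).
def bLineStep (keys : List String) (st : PySem.Set String × List (Int × String)) (line : String) :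
    PySem.Set String × List (Int × String) :=
  let clean := PySem.Str.strip line
  if clean == "" || st.1.contains clean then st
  else
    let seen := PySem.Set.add st.1 clean
    let low := PySem.Str.lower clean
    if PySem.Str.startswith low "source:" || PySem.Str.startswith low "http://"
        || PySem.Str.startswith low "https://" then (seen, st.2)
    else
      let hit : Int := ((keys.countP (fun k => PySem.Str.isIn k low) : Nat) : Int)
      if hit == 0 then (seen, st.2)
      else (seen, bInsert (hit, clean) st.2)

def extract_evidence_lines_alt (docs : List String) (keywords : List String) (max_lines : Int) : List String :=
  let keys := (keywords.filter (fun k => !(k == "") && !(PySem.Str.strip k == ""))).map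
    (fun k => PySem.Str.lower (PySem.Str.strip k))
  if keys.isEmpty then []
  else
    let st := docs.foldl (fun st d =>
      (PySem.Str.splitlines d).foldl (bLineStep keys) st) (PySem.Set.empty, [])
    (PySem.List.slice st.2 none (some max_lines)).map (fun p => p.2)

-- ===== PRECONDITION & SPEC =====
def Spec_extract_evidence_lines (docs : List String) (keywords : List String) (max_lines : Int) (out : List String) : Prop := out = extract_evidence_lines_alt docs keywords max_lines
instance (docs : List String) (keywords : List String) (max_lines : Int) (out : List String) : Decidable (Spec_extract_evidence_lines docs keywords max_lines out) := by unfold Spec_extract_evidence_lines; infer_instance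

-- ===== CLAIM (what is proved, stated in full; the proofs are below) =====
def Claim_equal_extract_evidence_lines : Prop := ∀ (docs : List String) (keywords : List String) (max_lines : Int), Dom_extract_evidence_lines docs keywords max_lines → Spec_extract_evidence_lines docs keywords max_lines (extract_evidence_lines docs keywords max_lines)

-- ===== LEMMAS AND PROOFS =====

theorem pvDropWhile_prefix {α : Type} (p : α → Bool) (l u : List α)
    (h : u <+: List.dropWhile p l) : List.dropWhile p u = u := by
  cases u with
  | nil => rfl
  | cons a u' =>
    have hne : List.dropWhile p l ≠ [] := by
      intro hnil; rw [hnil] at h; simp at h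
    have hhead : (List.dropWhile p l).head hne = a := by
      obtain ⟨t, ht⟩ := h
      simp [← ht]
    have hpa : p a = false := by
      have := List.head_dropWhile_not p hne
      rwa [hhead] at this
    simp [hpa]

theorem pvChars_strip_idem (l : List Char) :
    PySem.Chars.strip (PySem.Chars.strip l) = PySem.Chars.strip l := by
  simp only [PySem.Chars.strip, PySem.Chars.lstrip, PySem.Chars.rstrip]
  set p := PySem.Chars.isspace
  set t := List.dropWhile p l with ht
  have h1 : List.dropWhile p ((List.dropWhile p t.reverse).reverse) =
      (List.dropWhile p t.reverse).reverse := by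
    apply pvDropWhile_prefix p l
    rw [← ht]
    have h2 : List.dropWhile p t.reverse <:+ t.reverse := List.dropWhile_suffix p
    have := List.reverse_prefix.mpr h2
    simpa using this
  rw [h1, List.reverse_reverse, List.dropWhile_idempotent]

theorem pvStrip_idem (s : String) :
    PySem.Str.strip (PySem.Str.strip s) = PySem.Str.strip s := by
  simp only [PySem.Str.strip]
  rw [String.toList_ofList]
  rw [pvChars_strip_idem]

theorem pvLower_empty (c : String) :
    (PySem.Str.lower c == "") = (c == "") := by
  have h : (PySem.Str.lower c = "") ↔ (c = "") := by
    constructor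
    · intro h
      apply String.toList_inj.mp
      have := congrArg String.toList h
      simp [PySem.Str.toList_lower, PySem.Chars.lower] at this
      simp [this]
    · intro h; subst h; rfl
  simp [h]

def pvSkip (c : String) : Bool :=
  PySem.Str.startswith (PySem.Str.lower c) "source:" ||
  PySem.Str.startswith (PySem.Str.lower c) "http://" ||
  PySem.Str.startswith (PySem.Str.lower c) "https://"

def pvHit (keys : List String) (c : String) : Nat :=
  keys.countP (fun k => PySem.Str.isIn k (PySem.Str.lower c))

def pvQ (keys : List String) (c : String) : Bool :=
  (!pvSkip c && !(pvHit keys c == 0)) && !(c == "")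

theorem pvNoise_eq (c : String) (h : PySem.Str.strip c = c) :
    pyIsNoise c = ((c == "") || pvSkip c) := by
  simp only [pyIsNoise, pvSkip, h, pvLower_empty]
  by_cases hc : c = "" <;> simp [hc, beq_iff_eq, Bool.or_assoc]

theorem pvHit_foldl (keys : List String) (low : String) (a : Int) :
    keys.foldl (fun h k => if PySem.Str.isIn k low then h + 1 else h) a
      = a + ((keys.countP (fun k => PySem.Str.isIn k low) : Nat) : Int) := by
  induction keys generalizing a with
  | nil => simp
  | cons k ks ih =>
    simp only [List.foldl_cons, List.countP_cons]
    by_cases hk : PySem.Str.isIn k low = true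
    · rw [if_pos hk, ih]; simp only [hk, if_true]; push_cast; ring
    · rw [if_neg hk, ih]; simp only [hk, if_false, Bool.false_eq_true]; push_cast; ring

theorem pvContains_map (Y : List String) (f : String → Int) (x : String) :
    (PySem.Dict.mk (Y.map (fun c => (c, f c)))).contains x = Y.contains x := by
  induction Y with
  | nil => rfl
  | cons y ys ih =>
    simp only [PySem.Dict.contains, List.map_cons, List.any_cons] at ih ⊢
    rw [ih]
    by_cases h : y = x
    · subst h; simp [List.contains_eq_mem]
    · have hb : (y == x) = false := by simp [h]
      simp only [hb, List.contains_eq_mem, Bool.false_or]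
      simp only [List.mem_cons, decide_eq_decide]
      constructor
      · exact Or.inr
      · rintro (he | hmem)
        · exact absurd he.symm h
        · exact hmem

theorem pvGetD_map (Y : List String) (f : String → Int) (x : String) (hx : x ∈ Y) :
    (PySem.Dict.mk (Y.map (fun c => (c, f c)))).getD x 0 = f x := by
  induction Y with
  | nil => simp at hx
  | cons y ys ih =>
    by_cases hxy : y = x
    · subst hxy
      simp [PySem.Dict.getD, PySem.Dict.get?]
    · simp at hx
      rcases hx with hx | hx
      · exact absurd hx.symm hxy
      · have := ih hx
        simp only [PySem.Dict.getD, PySem.Dict.get?, List.map_cons, List.find?_cons] at this ⊢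
        have hne : ((y, f y).1 == x) = false := by simp [hxy]
        rw [hne]
        exact this

theorem pvDedup_append (xs : List String) (x : String) :
    PySem.List.dedup (xs ++ [x]) =
      (if (PySem.List.dedup xs).contains x then PySem.List.dedup xs
       else PySem.List.dedup xs ++ [x]) := by
  simp only [PySem.List.dedup, PySem.Set.ofList, List.foldl_append, List.foldl_cons,
    List.foldl_nil, PySem.Set.add, PySem.Set.contains]
  by_cases h : List.contains (List.foldl PySem.Set.add PySem.Set.empty xs) x = true <;> simp

theorem pvDictFold (f : String → Int) (q : String → Bool) (L : List String) :
    (List.foldl (fun (d : PySem.Dict String Int) c =>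
        if q c then
          (if !(d.contains c) || decide (d.getD c 0 < f c) then d.insert c (f c) else d)
        else d) PySem.Dict.empty L).items
      = (PySem.List.dedup (L.filter q)).map (fun c => (c, f c)) := by
  induction L using List.reverseRecOn with
  | nil => simp [PySem.List.dedup, PySem.Set.ofList, PySem.Dict.empty]
  | append_singleton L x ih =>
    rw [List.foldl_append, List.filter_append]
    by_cases hq : q x = true
    · simp only [List.foldl_cons, List.foldl_nil, List.filter_cons, hq, if_true,
        List.filter_nil, pvDedup_append]
      set Y := PySem.List.dedup (L.filter q) with hY
      have hD : (List.foldl (fun (d : PySem.Dict String Int) c =>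
          if q c then
            (if !(d.contains c) || decide (d.getD c 0 < f c) then d.insert c (f c) else d)
          else d) PySem.Dict.empty L) = PySem.Dict.mk (Y.map (fun c => (c, f c))) := by
        apply PySem.Dict.ext; rw [ih]
      rw [hD]
      by_cases hc : Y.contains x = true
      · have hmem : x ∈ Y := by simpa [List.contains_eq_mem] using hc
        rw [pvContains_map, hc]
        simp only [Bool.not_true, Bool.false_or, pvGetD_map Y f x hmem]
        simp
      · rw [pvContains_map, Bool.eq_false_iff.mpr hc]
        simp only [Bool.not_false, Bool.true_or, if_true]
        rw [PySem.Dict.insert]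
        rw [pvContains_map, Bool.eq_false_iff.mpr hc]
        simp
    · have hq' : q x = false := Bool.eq_false_iff.mpr hq
      simp only [List.foldl_cons, List.foldl_nil, hq', Bool.false_eq_true, if_false,
        List.filter_cons, List.filter_nil, List.append_nil]
      exact ih

theorem pvFilter_dedup (pq : String → Bool) (xs : List String) :
    (PySem.List.dedup xs).filter pq = PySem.List.dedup (xs.filter pq) := by
  induction xs using List.reverseRecOn with
  | nil => simp [PySem.List.dedup, PySem.Set.ofList]
  | append_singleton xs x ih =>
    rw [List.filter_append, pvDedup_append]
    by_cases hp : pq x = true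
    · simp only [List.filter_cons, hp, if_true, List.filter_nil, pvDedup_append]
      by_cases hm : x ∈ xs
      · have h1 : (PySem.List.dedup xs).contains x = true := by
          simp [List.contains_eq_mem, hm]
        have h2 : (PySem.List.dedup (xs.filter pq)).contains x = true := by
          simp [List.contains_eq_mem, List.mem_filter, hm, hp]
        rw [h1, h2]; simp only [if_true]; exact ih
      · have h1 : (PySem.List.dedup xs).contains x = false := by
          simp [List.contains_eq_mem, hm]
        have h2 : (PySem.List.dedup (xs.filter pq)).contains x = false := by
          simp [List.contains_eq_mem, List.mem_filter, hm]
        rw [h1, h2]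
        simp only [Bool.false_eq_true, if_false, List.filter_append, List.filter_cons, hp,
          if_true, List.filter_nil, ih]
    · have hp' : pq x = false := Bool.eq_false_iff.mpr hp
      simp only [List.filter_cons, hp', Bool.false_eq_true, if_false, List.filter_nil,
        List.append_nil]
      by_cases hm : x ∈ xs
      · have h1 : (PySem.List.dedup xs).contains x = true := by
          simp [List.contains_eq_mem, hm]
        rw [h1]; simp only [if_true]; exact ih
      · have h1 : (PySem.List.dedup xs).contains x = false := by
          simp [List.contains_eq_mem, hm]
        rw [h1]
        simp only [Bool.false_eq_true, if_false, List.filter_append, List.filter_cons, hp',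
          List.filter_nil, List.append_nil, ih]

theorem pvStepEq (keys : List String) (d : PySem.Dict String Int) (c : String)
    (hc : PySem.Str.strip c = c) :
    (if pyIsNoise c then d
     else
       let low := PySem.Str.lower c
       let hit : Int := keys.foldl (fun h k => if PySem.Str.isIn k low then h + 1 else h) 0
       if 0 < hit then
         if !(d.contains c) || decide (d.getD c 0 < hit) then d.insert c hit else d
       else d)
    = (if pvQ keys c then
         (if !(d.contains c) || decide (d.getD c 0 < ((pvHit keys c : Nat) : Int)) then
            d.insert c ((pvHit keys c : Nat) : Int) else d)
       else d) := by
  rw [pvNoise_eq c hc]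
  simp only [pvHit_foldl, zero_add, pvQ, pvHit]
  by_cases h0 : c = ""
  · simp [h0]
  · have h0' : (c == "") = false := by simp [h0]
    by_cases hs : pvSkip c = true
    · simp [h0', hs]
    · have hs' : pvSkip c = false := Bool.eq_false_iff.mpr hs
      simp only [h0', hs', Bool.or_self, Bool.false_eq_true, if_false,
        Bool.not_false, Bool.true_and]
      by_cases hz : List.countP (fun k => PySem.Str.isIn k (PySem.Str.lower c)) keys = 0
      · simp [hz]
      · have hb : (List.countP (fun k => PySem.Str.isIn k (PySem.Str.lower c)) keys == 0) = false := by
          simp only [beq_eq_false_iff_ne, ne_eq]; exact hz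
        have hpos : (0:Int) < ((List.countP (fun k => PySem.Str.isIn k (PySem.Str.lower c)) keys : Nat) : Int) := by
          exact_mod_cast Nat.pos_of_ne_zero hz
        simp only [hb, Bool.not_false, Bool.and_true, if_pos hpos, if_pos trivial]
        by_cases hcond : (!d.contains c ||
            decide (d.getD c 0 < ((List.countP (fun k => PySem.Str.isIn k (PySem.Str.lower c)) keys : Nat) : Int))) = true <;>
          simp [hcond]

def pvG (keys : List String) (c : String) : String × Int :=
  (c, ((pvHit keys c : Nat) : Int))

def pvStep (keys : List String) (d : PySem.Dict String Int) (c : String) : PySem.Dict String Int :=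
  if pvQ keys c then
    (if !(d.contains c) || decide (d.getD c 0 < ((pvHit keys c : Nat) : Int)) then
      d.insert c ((pvHit keys c : Nat) : Int) else d)
  else d

def pvInnerC (keys : List String) (scored : PySem.Dict String Int) (clean : String) :
    PySem.Dict String Int :=
  if pyIsNoise clean then scored
  else
    let low := PySem.Str.lower clean
    let hit : Int := keys.foldl (fun h k => if PySem.Str.isIn k low then h + 1 else h) 0
    if 0 < hit then
      if !(scored.contains clean) || decide (scored.getD clean 0 < hit) then
        scored.insert clean hit
      else scored
    else scored

theorem pvInnerC_eq (keys : List String) (d : PySem.Dict String Int) (c : String)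
    (hc : PySem.Str.strip c = c) : pvInnerC keys d c = pvStep keys d c :=
  pvStepEq keys d c hc

-- A's dict items, characterised: the qualifying unique cleaned lines in first-occurrence
-- order, each paired with its hit count.
theorem pvItems (keys docs : List String) :
    (docs.foldl (fun scored d =>
        (PySem.Str.splitlines d).foldl (fun scored line =>
          pvInnerC keys scored (PySem.Str.strip line)) scored) PySem.Dict.empty).items
    = (((PySem.List.dedup (((docs.flatMap (fun d => PySem.Str.splitlines d)).map
          PySem.Str.strip).filter (fun c => !(c == "")))).filter
            (fun c => !pvSkip c && !(pvHit keys c == 0))).map (pvG keys)) := by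
  set cleaned := (docs.flatMap (fun d => PySem.Str.splitlines d)).map PySem.Str.strip with hcleaned
  have h1 : (docs.foldl (fun scored d =>
        (PySem.Str.splitlines d).foldl (fun scored line =>
          pvInnerC keys scored (PySem.Str.strip line)) scored) PySem.Dict.empty)
      = cleaned.foldl (pvInnerC keys) PySem.Dict.empty := by
    rw [hcleaned, List.foldl_map, ← List.foldl_flatMap]
  rw [h1]
  have h2 : cleaned.foldl (pvInnerC keys) PySem.Dict.empty
      = cleaned.foldl (pvStep keys) PySem.Dict.empty := by
    apply PySem.List.foldl_congr_mem
    intro acc x hx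
    rw [hcleaned] at hx
    obtain ⟨line, _, rfl⟩ := List.mem_map.mp hx
    exact pvInnerC_eq keys acc _ (pvStrip_idem line)
  rw [h2]
  have h3 : (cleaned.foldl (pvStep keys) PySem.Dict.empty).items
      = (PySem.List.dedup (cleaned.filter (pvQ keys))).map (fun c => (c, ((pvHit keys c : Nat) : Int))) :=
    pvDictFold (fun c => ((pvHit keys c : Nat) : Int)) (pvQ keys) cleaned
  rw [h3]
  have h4 : PySem.List.dedup (cleaned.filter (pvQ keys))
      = (PySem.List.dedup (cleaned.filter (fun c => !(c == "")))).filter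
          (fun c => !pvSkip c && !(pvHit keys c == 0)) := by
    rw [pvFilter_dedup, List.filter_filter]
    rfl
  rw [h4]
  rfl

-- ===== B-side lemmas =====

-- A's sorted2 comparator on (clean, hit) pairs.
def pvBeforeA (x y : String × Int) : Bool :=
  decide (-x.2 < -y.2) || (!decide (-y.2 < -x.2) && decide ((PySem.Str.len x.1 : Int) < (PySem.Str.len y.1 : Int)))

theorem pvSorted2_eq (L : List (String × Int)) :
    PySem.List.sorted2 L (fun x => -x.2) (fun x => (PySem.Str.len x.1 : Int))
      = L.foldl (fun acc x => PySem.List.insertBy pvBeforeA x acc) [] := rfl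

def pvSw (p : String × Int) : Int × String := (p.2, p.1)

-- B's tuple comparison agrees with A's sorted2 comparator (swapped components).
theorem pvBefore_eq (x y : String × Int) :
    (decide (-(pvSw x).1 < -(pvSw y).1) || ((-(pvSw x).1 == -(pvSw y).1)
        && decide ((PySem.Str.len (pvSw x).2 : Int) < (PySem.Str.len (pvSw y).2 : Int))))
      = pvBeforeA x y := by
  simp only [pvSw, pvBeforeA]
  rcases lt_trichotomy (-x.2 : Int) (-y.2) with h | h | h
  · simp [h, not_lt_of_gt h]
  · simp [h]
  · simp [h, not_lt_of_gt h, ne_of_gt h]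

theorem pvInsMap (x : String × Int) (acc : List (String × Int)) :
    bInsert (pvSw x) (acc.map pvSw) = (PySem.List.insertBy pvBeforeA x acc).map pvSw := by
  induction acc with
  | nil => rfl
  | cons y ys ih =>
    simp only [List.map_cons, bInsert, PySem.List.insertBy]
    rw [show (decide (-(pvSw x).1 < -(pvSw y).1) || ((-(pvSw x).1 == -(pvSw y).1)
        && decide ((PySem.Str.len (pvSw x).2 : Int) < (PySem.Str.len (pvSw y).2 : Int))))
      = pvBeforeA x y from pvBefore_eq x y]
    by_cases h : pvBeforeA x y = true
    · simp [h]
    · simp [Bool.eq_false_iff.mpr h, ih]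

theorem pvFoldMap (L : List (String × Int)) (acc : List (String × Int)) :
    (L.map pvSw).foldl (fun a x => bInsert x a) (acc.map pvSw)
      = (L.foldl (fun a x => PySem.List.insertBy pvBeforeA x a) acc).map pvSw := by
  induction L generalizing acc with
  | nil => rfl
  | cons y ys ih =>
    simp only [List.map_cons, List.foldl_cons]
    rw [pvInsMap y acc, ih]

theorem pvSliceMap {α β : Type} (f : α → β) (l : List α) (b : Int) :
    PySem.List.slice (l.map f) none (some b) = (PySem.List.slice l none (some b)).map f := by
  simp [PySem.List.slice, List.map_take]

-- B's streaming step on an already-stripped line.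
def pvBStep (keys : List String) (st : PySem.Set String × List (Int × String)) (c : String) :
    PySem.Set String × List (Int × String) :=
  if c == "" || st.1.contains c then st
  else
    let seen := PySem.Set.add st.1 c
    if pvSkip c then (seen, st.2)
    else
      if ((pvHit keys c : Nat) : Int) == 0 then (seen, st.2)
      else (seen, bInsert (((pvHit keys c : Nat) : Int), c) st.2)

-- The streaming-fold invariant: seen = the distinct non-empty cleaned lines, ranked = the
-- qualifying ones inserted in order.
theorem pvBFold (keys : List String) (P : List String) :
    P.foldl (pvBStep keys) (PySem.Set.empty, ([] : List (Int × String)))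
      = (PySem.List.dedup (P.filter (fun c => !(c == ""))),
         ((((PySem.List.dedup (P.filter (fun c => !(c == "")))).filter
             (fun c => !pvSkip c && !(pvHit keys c == 0))).map (pvG keys)).map pvSw).foldl
           (fun a x => bInsert x a) []) := by
  induction P using List.reverseRecOn with
  | nil => simp [PySem.List.dedup, PySem.Set.ofList]
  | append_singleton P x ih =>
    rw [List.foldl_append, List.foldl_cons, List.foldl_nil, ih, List.filter_append]
    by_cases h0 : x = ""
    · simp [pvBStep, h0]
    · have h0' : (x == "") = false := by simp [h0]
      simp only [List.filter_cons, h0', Bool.not_false, if_true, List.filter_nil,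
        pvDedup_append]
      set Y := PySem.List.dedup (P.filter (fun c => !(c == ""))) with hY
      by_cases hc : Y.contains x = true
      · have hm : x ∈ Y := by simpa [List.contains_eq_mem] using hc
        simp [pvBStep, h0', PySem.Set.contains, List.contains_eq_mem, hm]
      · have hc' : Y.contains x = false := Bool.eq_false_iff.mpr hc
        have hm : x ∉ Y := by simpa [List.contains_eq_mem] using hc'
        simp only [hc', Bool.false_eq_true, if_false]
        have hadd : PySem.Set.add Y x = Y ++ [x] := by
          simp [PySem.Set.add, PySem.Set.contains, List.contains_eq_mem, hm]
        by_cases hs : pvSkip x = true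
        · simp [pvBStep, h0', PySem.Set.contains, List.contains_eq_mem, hm, hs, hadd,
            List.filter_append]
        · have hs' : pvSkip x = false := Bool.eq_false_iff.mpr hs
          by_cases hz : (pvHit keys x == 0) = true
          · have hzi : (((pvHit keys x : Nat) : Int) == 0) = true := by
              simp only [beq_iff_eq] at hz ⊢; exact_mod_cast hz
            simp [pvBStep, h0', PySem.Set.contains, List.contains_eq_mem, hm, hs', hzi,
              hadd, List.filter_append, hz]
          · have hz' : (pvHit keys x == 0) = false := Bool.eq_false_iff.mpr hz
            have hzn : ¬ pvHit keys x = 0 := by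
              simpa [beq_eq_false_iff_ne] using hz'
            have hzi : (((pvHit keys x : Nat) : Int) == 0) = false := by
              simp only [beq_eq_false_iff_ne, ne_eq]
              exact_mod_cast hzn
            simp [pvBStep, h0', PySem.Set.contains, List.contains_eq_mem, hm, hs', hzi,
              hadd, List.filter_append, hz', pvG, pvSw]

theorem pvMain (docs keywords : List String) (max_lines : Int) :
    extract_evidence_lines docs keywords max_lines
      = extract_evidence_lines_alt docs keywords max_lines := by
  simp only [extract_evidence_lines, extract_evidence_lines_alt]
  set keys := (keywords.filter (fun k => !(k == "") && !(PySem.Str.strip k == ""))).map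
    (fun k => PySem.Str.lower (PySem.Str.strip k)) with hkeys
  by_cases hk : keys.isEmpty = true
  · rw [if_pos hk, if_pos hk]
  · rw [if_neg hk, if_neg hk]
    set cleaned := (docs.flatMap (fun d => PySem.Str.splitlines d)).map PySem.Str.strip with hcleaned
    set U := (PySem.List.dedup (cleaned.filter (fun c => !(c == "")))).filter
        (fun c => !pvSkip c && !(pvHit keys c == 0)) with hU
    have hB : (docs.foldl (fun st d => (PySem.Str.splitlines d).foldl (bLineStep keys) st)
        (PySem.Set.empty, ([] : List (Int × String))))
        = cleaned.foldl (pvBStep keys) (PySem.Set.empty, []) := by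
      rw [hcleaned, List.foldl_map, ← List.foldl_flatMap]
      rfl
    have hA : (docs.foldl (fun scored d =>
        (PySem.Str.splitlines d).foldl (fun scored line =>
          let clean := PySem.Str.strip line
          if pyIsNoise clean then scored
          else
            let low := PySem.Str.lower clean
            let hit : Int := keys.foldl (fun h k => if PySem.Str.isIn k low then h + 1 else h) 0
            if 0 < hit then
              if !(scored.contains clean) || decide (scored.getD clean 0 < hit) then
                scored.insert clean hit
              else scored
            else scored) scored) PySem.Dict.empty).items = U.map (pvG keys) :=
      pvItems keys docs
    have hrank : ((((PySem.List.dedup (cleaned.filter (fun c => !(c == "")))).filter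
          (fun c => !pvSkip c && !(pvHit keys c == 0))).map (pvG keys)).map pvSw).foldl
            (fun a x => bInsert x a) []
        = (PySem.List.sorted2 (U.map (pvG keys)) (fun x => -x.2)
            (fun x => (PySem.Str.len x.1 : Int))).map pvSw := by
      rw [pvSorted2_eq]
      exact pvFoldMap (U.map (pvG keys)) []
    rw [hA, hB, pvBFold keys cleaned, hrank]
    simp [pvSliceMap pvSw, pvSw]

-- ===== VERDICT (by name: the statement is the Claim_ definition above) =====
theorem extract_evidence_lines_spec : Claim_equal_extract_evidence_lines := by
  intro docs keywords max_lines _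
  unfold Spec_extract_evidence_lines
  exact pvMain docs keywords max_lines
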